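-- pv_equiv track=rewrite | github.com/fiandev/deep-eye | core/subdomain_scanner.py | _aggregate_severity
-- ===== SOURCE A (Python) =====
-- from typing import Dict, List, Set, TYPE_CHECKING
--
-- def _aggregate_severity(scan_results: Dict) -> Dict:
--     """Aggregate severity counts from all subdomain scans."""
--     summary = {
--         'critical': 0,
--         'high': 0,
--         'medium': 0,
--         'low': 0,
--         'info': 0
--     }
--
--     for subdomain, result in scan_results.items():
--         for vuln in result.get('vulnerabilities', []):
--             severity = vuln.get('severity', 'info').lower()
--             if severity in summary:
--                 summary[severity] += 1
--
--     return summary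
-- ===== SOURCE B (Python) =====
-- def _aggregate_severity(scan_results):
--     """Aggregate severity counts from all subdomain scans."""
--     sevs = sorted(v.get('severity', 'info').lower()
--                   for r in scan_results.values()
--                   for v in r.get('vulnerabilities', []))
--     runs = {}
--     i = 0
--     while i < len(sevs):
--         j = i + 1
--         while j < len(sevs) and sevs[j] == sevs[i]:
--             j += 1
--         runs[sevs[i]] = j - i
--         i = j
--     return {k: runs.get(k, 0) for k in ('critical', 'high', 'medium', 'low', 'info')}
-- ===== Notes on version B (the rewrite author's own statement) =====
-- stated objective: alternative
-- what changed: Replaces guarded increments into a preset mutable dict during the nested iteration with a sort-then-scan algorithm: flatten all lowercased severities, sort them, run-length-encode the sorted list into a runs dict in one linear scan, then project that dict onto the five fixed keys.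
import Mathlib
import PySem

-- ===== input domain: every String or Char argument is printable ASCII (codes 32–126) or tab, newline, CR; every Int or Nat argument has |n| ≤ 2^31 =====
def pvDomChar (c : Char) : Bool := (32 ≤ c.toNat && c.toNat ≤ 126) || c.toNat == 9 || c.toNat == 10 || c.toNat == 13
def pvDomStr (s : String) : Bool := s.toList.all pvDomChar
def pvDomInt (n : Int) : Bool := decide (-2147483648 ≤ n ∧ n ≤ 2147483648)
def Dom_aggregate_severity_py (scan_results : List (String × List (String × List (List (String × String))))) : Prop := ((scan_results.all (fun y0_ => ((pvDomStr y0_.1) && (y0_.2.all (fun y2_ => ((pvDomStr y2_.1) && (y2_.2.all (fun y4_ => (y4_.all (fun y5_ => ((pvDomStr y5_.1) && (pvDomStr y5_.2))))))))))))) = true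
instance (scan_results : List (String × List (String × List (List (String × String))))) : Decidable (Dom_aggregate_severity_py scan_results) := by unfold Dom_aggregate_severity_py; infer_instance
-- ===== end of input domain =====

-- B replaces A's guarded increments into a preset dict (during the nested iteration) by a
-- sort-then-scan algorithm: flatten the lowercased severities, sort them, run-length-encode
-- the sorted list into a runs dict in one scan, project onto the five fixed keys
-- (objective: alternative).

-- ===== PORT A =====
-- the body of A's inner loop: guarded increment of the summary dict
def pvStepA (summary : PySem.Dict String Int) (severity : String) : PySem.Dict String Int :=
  if summary.contains severity then summary.modify severity 0 (· + 1) else summary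

def aggregate_severity_py (scan_results : List (String × List (String × List (List (String × String))))) : List (String × Int) :=
  (scan_results.foldl
    (fun summary subres =>
      ((PySem.Dict.mk subres.2).getD "vulnerabilities" []).foldl
        (fun summary vuln =>
          pvStepA summary (PySem.Str.lower ((PySem.Dict.mk vuln).getD "severity" "info")))
        summary)
    (PySem.Dict.ofList [("critical", 0), ("high", 0), ("medium", 0), ("low", 0), ("info", 0)])).items

-- ===== PORT B =====
-- Source B's run-length while loop over indices i < j is ported as the equivalent structural
-- recursion on the remaining suffix sevs[i:]: the inner 'while sevs[j] == sevs[i]' scan is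
-- the length of the leading run of the tail (takeWhile), and 'i = j' drops that run.
def pvRunsDict : List String → PySem.Dict String Int → PySem.Dict String Int
  | [], runs => runs
  | x :: xs, runs =>
    let n := (xs.takeWhile (fun y => y == x)).length
    pvRunsDict (xs.drop n) (runs.insert x ((n : Int) + 1))
termination_by sevs _ => sevs.length
decreasing_by simp

def aggregate_severity_py_alt (scan_results : List (String × List (String × List (List (String × String))))) : List (String × Int) :=
  let sevs := PySem.List.sorted
    (scan_results.flatMap (fun subres =>
      ((PySem.Dict.mk subres.2).getD "vulnerabilities" []).map (fun vuln =>
        PySem.Str.lower ((PySem.Dict.mk vuln).getD "severity" "info"))))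
    (fun s => s) false
  let runs := pvRunsDict sevs PySem.Dict.empty
  ["critical", "high", "medium", "low", "info"].map (fun k => (k, runs.getD k 0))

-- ===== PRECONDITION & SPEC =====
def Spec_aggregate_severity_py (scan_results : List (String × List (String × List (List (String × String))))) (out : List (String × Int)) : Prop := out = aggregate_severity_py_alt scan_results
instance (scan_results : List (String × List (String × List (List (String × String))))) (out : List (String × Int)) : Decidable (Spec_aggregate_severity_py scan_results out) := by unfold Spec_aggregate_severity_py; infer_instance

-- ===== CLAIM (what is proved, stated in full; the proofs are below) =====
def Claim_equal_aggregate_severity_py : Prop := ∀ (scan_results : List (String × List (String × List (List (String × String))))), Dom_aggregate_severity_py scan_results → Spec_aggregate_severity_py scan_results (aggregate_severity_py scan_results)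

-- ===== LEMMAS AND PROOFS =====

lemma keys_foldl_stepA : ∀ (sevs : List String) (d : PySem.Dict String Int),
    (sevs.foldl pvStepA d).keys = d.keys
  | [], _ => rfl
  | s :: sevs, d => by
    simp only [List.foldl_cons]
    rw [keys_foldl_stepA sevs (pvStepA d s)]
    unfold pvStepA
    split
    · rename_i h
      rw [PySem.Dict.keys_modify, PySem.Dict.keys_insert_of_contains _ _ h]
    · rfl

lemma getD_foldl_stepA : ∀ (sevs : List String) (d : PySem.Dict String Int) (k : String),
    d.contains k = true →
    (sevs.foldl pvStepA d).getD k 0 = d.getD k 0 + (sevs.count k : Int)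
  | [], d, k, _ => by simp
  | s :: sevs, d, k, hk => by
    simp only [List.foldl_cons]
    by_cases h : d.contains s = true
    · have hstep : pvStepA d s = d.modify s 0 (· + 1) := by unfold pvStepA; simp [h]
      have hk' : (d.modify s 0 (· + 1)).contains k = true := by
        rw [PySem.Dict.contains_modify]; simp [hk]
      rw [hstep, getD_foldl_stepA sevs _ k hk', PySem.Dict.getD_modify]
      rw [List.count_cons]
      by_cases hks : k = s
      · subst hks; simp; omega
      · have : (s == k) = false := by simp [beq_eq_false_iff_ne]; exact fun e => hks e.symm
        simp [hks, this]
    · have hstep : pvStepA d s = d := by unfold pvStepA; simp [h]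
      have hsk : (s == k) = false := by
        simp only [beq_eq_false_iff_ne]
        intro e
        exact h (by rw [e]; exact hk)
      rw [hstep, getD_foldl_stepA sevs d k hk, List.count_cons, hsk]
      simp

lemma drop_takeWhile_len (p : String → Bool) (xs : List String) :
    xs.drop (xs.takeWhile p).length = xs.dropWhile p := by
  induction xs with
  | nil => rfl
  | cons a l ih => by_cases h : p a <;> simp [List.takeWhile, List.dropWhile, h, ih]

-- after x's leading run, a ≤-sorted list contains no further x
lemma dropWhile_ne_of_sorted (x : String) (xs : List String)
    (hp : (x :: xs).Pairwise (· ≤ ·)) :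
    ∀ y ∈ xs.dropWhile (fun y => y == x), y ≠ x := by
  cases hd : xs.dropWhile (fun y => y == x) with
  | nil => simp
  | cons r rs =>
    have hne : xs.dropWhile (fun y => y == x) ≠ [] := by simp [hd]
    have hr_ne : (r == x) = false := by
      have h2 := List.head_dropWhile_not (fun y => y == x) hne
      rwa [show (xs.dropWhile (fun y => y == x)).head hne = r from by simp [hd]] at h2
    have hr_mem : r ∈ xs := (List.dropWhile_sublist _).mem (by rw [hd]; exact List.mem_cons_self)
    have hxr : x < r := lt_of_le_of_ne ((List.pairwise_cons.mp hp).1 r hr_mem)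
      (fun e => by simp [← e] at hr_ne)
    have hpr : (r :: rs).Pairwise (· ≤ ·) :=
      hd ▸ ((List.pairwise_cons.mp hp).2).sublist (List.dropWhile_sublist _)
    intro y hy
    rcases List.mem_cons.mp hy with rfl | hy'
    · exact fun e => absurd hxr (by rw [e]; exact lt_irrefl x)
    · intro e
      have hry : r ≤ y := (List.pairwise_cons.mp hpr).1 y hy'
      rw [e] at hry
      exact absurd (lt_of_lt_of_le hxr hry) (lt_irrefl x)

-- run-length encoding of a ≤-sorted list: looking up k yields its multiplicity
lemma getD_pvRunsDict : ∀ (zs : List String), zs.Pairwise (· ≤ ·) →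
    ∀ (d : PySem.Dict String Int) (k : String),
    (pvRunsDict zs d).getD k 0 =
      if zs.count k = 0 then d.getD k 0 else (zs.count k : Int)
  | [], _, d, k => by rw [pvRunsDict]; simp
  | x :: xs, hp, d, k => by
    rw [pvRunsDict]
    rw [drop_takeWhile_len]
    have hsplit : xs = xs.takeWhile (fun y => y == x) ++ xs.dropWhile (fun y => y == x) :=
      (List.takeWhile_append_dropWhile).symm
    have hprest : (xs.dropWhile (fun y => y == x)).Pairwise (· ≤ ·) :=
      ((List.pairwise_cons.mp hp).2).sublist (List.dropWhile_sublist _)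
    have hrest_ne := dropWhile_ne_of_sorted x xs hp
    have htake_eq : ∀ y ∈ xs.takeWhile (fun y => y == x), y = x := by
      intro y hy; simpa using List.mem_takeWhile_imp hy
    have hcount_rest_x : (xs.dropWhile (fun y => y == x)).count x = 0 := by
      rw [List.count_eq_zero]; intro hx; exact hrest_ne x hx rfl
    rw [getD_pvRunsDict (xs.dropWhile (fun y => y == x)) hprest]
    have hcx : (x :: xs).count x = (xs.takeWhile (fun y => y == x)).length + 1 := by
      rw [List.count_cons_self]
      conv_lhs => rw [hsplit]
      rw [List.count_append, hcount_rest_x]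
      have : (xs.takeWhile (fun y => y == x)).count x = (xs.takeWhile (fun y => y == x)).length := by
        rw [List.count_eq_length.mpr]
        intro y hy; exact ((htake_eq y hy) ▸ rfl)
      omega
    by_cases hkx : k = x
    · subst hkx
      rw [hcount_rest_x, hcx]
      simp [PySem.Dict.getD_insert_self]
    · have hck : (x :: xs).count k = (xs.dropWhile (fun y => y == x)).count k := by
        rw [List.count_cons_of_ne (by simpa [eq_comm] using hkx)]
        conv_lhs => rw [hsplit]
        rw [List.count_append]
        have h1 : (xs.takeWhile (fun y => y == x)).count k = 0 := by
          rw [List.count_eq_zero]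
          intro hk; exact hkx (htake_eq k hk)
        omega
      rw [hck, PySem.Dict.getD_insert_of_ne d ((((xs.takeWhile (fun y => y == x)).length : Int)) + 1) 0 hkx]
  termination_by zs => zs.length
  decreasing_by
    have h1 : (xs.dropWhile (fun y => y == x)).length ≤ xs.length :=
      (List.dropWhile_sublist _).length_le
    simpa using Nat.lt_succ_of_le h1

-- ===== VERDICT (by name: the statement is the Claim_ definition above) =====
theorem aggregate_severity_py_spec : Claim_equal_aggregate_severity_py := by
  intro L _
  unfold Spec_aggregate_severity_py aggregate_severity_py aggregate_severity_py_alt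
  set sev : List (String × String) → String :=
    fun vuln => PySem.Str.lower ((PySem.Dict.mk vuln).getD "severity" "info") with hsev
  set V : (String × List (String × List (List (String × String)))) → List (List (String × String)) :=
    fun subres => (PySem.Dict.mk subres.2).getD "vulnerabilities" [] with hV
  set init : PySem.Dict String Int :=
    PySem.Dict.ofList [("critical", 0), ("high", 0), ("medium", 0), ("low", 0), ("info", 0)] with hinit
  have key : L.foldl (fun summary subres => (V subres).foldl (fun summary vuln => pvStepA summary (sev vuln)) summary) init
      = (L.flatMap (fun subres => (V subres).map sev)).foldl pvStepA init := by
    rw [List.foldl_flatMap]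
    simp [List.foldl_map]
  rw [key]
  set sevs := L.flatMap (fun subres => (V subres).map sev) with hsevs
  have hkeys : (sevs.foldl pvStepA init).keys = ["critical", "high", "medium", "low", "info"] := by
    rw [keys_foldl_stepA]; rfl
  have hnd : (sevs.foldl pvStepA init).keys.Nodup := by rw [hkeys]; decide
  rw [PySem.Dict.items_eq_map_keys _ hnd 0, hkeys]
  apply List.map_congr_left
  intro k hkmem
  have hc : init.contains k = true := by
    fin_cases hkmem <;> decide
  have h0 : init.getD k 0 = 0 := by
    fin_cases hkmem <;> decide
  rw [getD_foldl_stepA sevs init k hc, h0, zero_add]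
  have hsorted := PySem.List.sorted_pairwise sevs (fun s => s) (κ := String)
  rw [getD_pvRunsDict _ hsorted PySem.Dict.empty k]
  have hperm : (PySem.List.sorted sevs (fun s => s) false).Perm sevs :=
    PySem.List.sorted_perm sevs (fun s => s) false
  rw [hperm.count_eq]
  by_cases hz : sevs.count k = 0
  · simp [hz]
  · simp [hz]
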